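-- pv_equiv track=rewrite | github.com/guozijn/pulmodex | src/inference/pipeline.py | _patch_coords
-- ===== SOURCE A (Python) =====
-- def _patch_coords(D: int, H: int, W: int, patch_size: int, stride: int):
--     """Yield (zs, ys, xs) corner coordinates for a sliding window."""
--     for z in range(0, max(D - patch_size + 1, 1), stride):
--         for y in range(0, max(H - patch_size + 1, 1), stride):
--             for x in range(0, max(W - patch_size + 1, 1), stride):
--                 ze = min(z + patch_size, D)
--                 ye = min(y + patch_size, H)
--                 xe = min(x + patch_size, W)
--                 yield ze - patch_size, ye - patch_size, xe - patch_size
-- ===== SOURCE B (Python) =====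
-- def _patch_coords(D: int, H: int, W: int, patch_size: int, stride: int):
--     """Yield (zs, ys, xs) corner coordinates for a sliding window."""
--     def axis(L):
--         return [min(c + patch_size, L) - patch_size
--                 for c in range(0, max(L - patch_size + 1, 1), stride)]
--     zs, ys, xs = axis(D), axis(H), axis(W)
--     ny, nx = len(ys), len(xs)
--     for i in range(len(zs) * ny * nx):
--         q, xi = i // nx, i % nx
--         zi, yi = q // ny, q % ny
--         yield zs[zi], ys[yi], xs[xi]
-- ===== Notes on version B (the rewrite author's own statement) =====
-- stated objective: alternative
-- what changed: B precomputes the clamped corner list once per axis, then emits the Cartesian product with a single flat index loop that recovers (zi,yi,xi) by div/mod, instead of A's three hand-nested loops recomputing min-clamps in the innermost body.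
import Mathlib
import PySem

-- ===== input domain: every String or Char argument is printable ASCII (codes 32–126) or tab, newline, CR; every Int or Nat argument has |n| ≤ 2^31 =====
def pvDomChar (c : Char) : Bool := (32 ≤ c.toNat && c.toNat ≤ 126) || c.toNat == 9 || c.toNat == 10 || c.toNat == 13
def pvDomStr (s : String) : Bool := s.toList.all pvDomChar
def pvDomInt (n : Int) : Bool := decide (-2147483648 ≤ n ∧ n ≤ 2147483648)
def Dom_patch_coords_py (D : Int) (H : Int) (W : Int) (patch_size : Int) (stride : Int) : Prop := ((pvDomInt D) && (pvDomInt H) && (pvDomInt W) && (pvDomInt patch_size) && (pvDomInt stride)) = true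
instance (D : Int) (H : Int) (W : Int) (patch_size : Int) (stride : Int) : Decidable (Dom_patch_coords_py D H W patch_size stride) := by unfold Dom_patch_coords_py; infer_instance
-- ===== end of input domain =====

-- B replaces A's three nested loops (min-clamp recomputed per cell) by one clamped corner list per
-- axis and a single flat index loop recovering (zi, yi, xi) by div/mod; same cost, different shape.
-- A is a generator; both sides are compared as the list of yielded triples.

-- ===== PORT A =====
def patch_coords_py (D : Int) (H : Int) (W : Int) (patch_size : Int) (stride : Int) : List (Int × Int × Int) :=
  (PySem.List.pyRange 0 (max (D - patch_size + 1) 1) stride).foldl (fun acc z =>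
    (PySem.List.pyRange 0 (max (H - patch_size + 1) 1) stride).foldl (fun acc y =>
      (PySem.List.pyRange 0 (max (W - patch_size + 1) 1) stride).foldl (fun acc x =>
        acc ++ [(min (z + patch_size) D - patch_size,
                 min (y + patch_size) H - patch_size,
                 min (x + patch_size) W - patch_size)]) acc) acc) []

-- ===== PORT B =====
-- helper: the per-axis list of clamped corner coordinates (Source B's 'axis')
def pvAxis (patch_size : Int) (stride : Int) (L : Int) : List Int :=
  (PySem.List.pyRange 0 (max (L - patch_size + 1) 1) stride).map
    (fun c => min (c + patch_size) L - patch_size)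

-- the list indexings zs[zi]/ys[yi]/xs[xi] are always in range when the loop runs
-- (proved in the lemmas below), so pyGetD's default 0 is unreachable
def patch_coords_py_alt (D : Int) (H : Int) (W : Int) (patch_size : Int) (stride : Int) : List (Int × Int × Int) :=
  let zs := pvAxis patch_size stride D
  let ys := pvAxis patch_size stride H
  let xs := pvAxis patch_size stride W
  let ny : Int := ys.length
  let nx : Int := xs.length
  (PySem.List.pyRange 0 ((zs.length : Int) * ny * nx) 1).map (fun i =>
    let q := PySem.Int.floordiv i nx
    let xi := PySem.Int.mod i nx
    let zi := PySem.Int.floordiv q ny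
    let yi := PySem.Int.mod q ny
    (PySem.List.pyGetD zs zi 0, PySem.List.pyGetD ys yi 0, PySem.List.pyGetD xs xi 0))

-- ===== PRECONDITION & SPEC =====
-- Pre_ excludes only stride = 0, where Python's range(0, _, 0) raises ValueError in both A and B.
def Pre_patch_coords_py (D : Int) (H : Int) (W : Int) (patch_size : Int) (stride : Int) : Prop :=
  stride ≠ 0
instance (D : Int) (H : Int) (W : Int) (patch_size : Int) (stride : Int) : Decidable (Pre_patch_coords_py D H W patch_size stride) := by unfold Pre_patch_coords_py; infer_instance

def pvWitness_patch_coords_py : Int × Int × Int × Int × Int := (5, 4, 4, 2, 2)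

def Spec_patch_coords_py (D : Int) (H : Int) (W : Int) (patch_size : Int) (stride : Int) (out : List (Int × Int × Int)) : Prop := out = patch_coords_py_alt D H W patch_size stride
instance (D : Int) (H : Int) (W : Int) (patch_size : Int) (stride : Int) (out : List (Int × Int × Int)) : Decidable (Spec_patch_coords_py D H W patch_size stride out) := by unfold Spec_patch_coords_py; infer_instance

-- ===== CLAIM (what is proved, stated in full; the proofs are below) =====
def Claim_equal_patch_coords_py : Prop := ∀ (D : Int) (H : Int) (W : Int) (patch_size : Int) (stride : Int), Dom_patch_coords_py D H W patch_size stride → Pre_patch_coords_py D H W patch_size stride → Spec_patch_coords_py D H W patch_size stride (patch_coords_py D H W patch_size stride)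

-- ===== LEMMAS AND PROOFS =====

-- enumerating range (n*m) equals the double loop over range n × range m
theorem pv_map_range_mul {α : Type} (n m : Nat) (f : Nat → α) :
    (List.range (n * m)).map f
      = (List.range n).flatMap (fun q => (List.range m).map (fun r => f (q * m + r))) := by
  induction n generalizing f with
  | zero => simp
  | succ n ih =>
    have h : (n + 1) * m = m + n * m := by ring
    rw [h, List.range_add, List.map_append, List.map_map,
        List.range_succ_eq_map, List.flatMap_cons, List.flatMap_map]
    simp only [Nat.zero_mul, Nat.zero_add, Function.comp_def, Nat.succ_eq_add_one]
    congr 1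
    rw [ih (fun k => f (m + k))]
    apply List.flatMap_congr
    intro q _
    apply List.map_congr_left
    intro r _
    congr 1
    ring

-- a loop over range l.length reading l.getD is a loop over l (map form)
theorem pv_map_range_getD {β : Type} (l : List Int) (g : Int → β) :
    (List.range l.length).map (fun i => g (l.getD i 0)) = l.map g := by
  induction l with
  | nil => simp
  | cons a t ih =>
    rw [List.length_cons, List.range_succ_eq_map, List.map_cons, List.map_map]
    simpa using congrArg (List.cons (g a)) ih

-- a loop over range l.length reading l.getD is a loop over l (flatMap form)
theorem pv_flatMap_range_getD {β : Type} (l : List Int) (g : Int → List β) :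
    (List.range l.length).flatMap (fun i => g (l.getD i 0)) = l.flatMap g := by
  induction l with
  | nil => simp
  | cons a t ih =>
    rw [List.length_cons, List.range_succ_eq_map, List.flatMap_cons, List.flatMap_map]
    simpa using congrArg (fun s => g a ++ s) ih

theorem pv_decode_fst (zi yi xi ny nx : Nat) (hy : yi < ny) (hx : xi < nx) :
    ((zi * (ny * nx) + (yi * nx + xi) : Nat)) / nx = zi * ny + yi := by
  have h : zi * (ny * nx) + (yi * nx + xi) = xi + (zi * ny + yi) * nx := by ring
  rw [h, Nat.add_mul_div_right _ _ (Nat.lt_of_le_of_lt (Nat.zero_le _) hx),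
      Nat.div_eq_of_lt hx, Nat.zero_add]

theorem pv_decode_snd (zi yi xi ny nx : Nat) (hx : xi < nx) :
    ((zi * (ny * nx) + (yi * nx + xi) : Nat)) % nx = xi := by
  have h : zi * (ny * nx) + (yi * nx + xi) = xi + (zi * ny + yi) * nx := by ring
  rw [h, Nat.add_mul_mod_self_right, Nat.mod_eq_of_lt hx]

-- the whole flat-index enumeration of B equals the nested flatMap over the three lists
theorem pv_flat_product (zs ys xs : List Int) :
    (PySem.List.pyRange 0 ((zs.length : Int) * (ys.length : Int) * (xs.length : Int)) 1).map (fun i =>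
        (PySem.List.pyGetD zs (PySem.Int.floordiv (PySem.Int.floordiv i (xs.length : Int)) (ys.length : Int)) 0,
         PySem.List.pyGetD ys (PySem.Int.mod (PySem.Int.floordiv i (xs.length : Int)) (ys.length : Int)) 0,
         PySem.List.pyGetD xs (PySem.Int.mod i (xs.length : Int)) 0))
      = zs.flatMap (fun z => ys.flatMap (fun y => xs.map (fun x => (z, y, x)))) := by
  have hN : ((zs.length : Int) * (ys.length : Int) * (xs.length : Int))
      = ((zs.length * (ys.length * xs.length) : Nat) : Int) := by push_cast; ring
  rw [hN, PySem.List.pyRange_zero_natCast, List.map_map,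
      pv_map_range_mul]
  have step : ∀ zi < zs.length,
      (List.range (ys.length * xs.length)).map (fun r =>
        ((fun i =>
          (PySem.List.pyGetD zs (PySem.Int.floordiv (PySem.Int.floordiv i (xs.length : Int)) (ys.length : Int)) 0,
           PySem.List.pyGetD ys (PySem.Int.mod (PySem.Int.floordiv i (xs.length : Int)) (ys.length : Int)) 0,
           PySem.List.pyGetD xs (PySem.Int.mod i (xs.length : Int)) 0)) ∘ (fun k : Nat => (k : Int)))
          (zi * (ys.length * xs.length) + r))
      = ys.flatMap (fun y => xs.map (fun x => (zs.getD zi 0, y, x))) := by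
    intro zi _
    rw [pv_map_range_mul]
    have inner : ∀ yi ∈ List.range ys.length,
        (List.range xs.length).map (fun xi =>
          ((fun i =>
            (PySem.List.pyGetD zs (PySem.Int.floordiv (PySem.Int.floordiv i (xs.length : Int)) (ys.length : Int)) 0,
             PySem.List.pyGetD ys (PySem.Int.mod (PySem.Int.floordiv i (xs.length : Int)) (ys.length : Int)) 0,
             PySem.List.pyGetD xs (PySem.Int.mod i (xs.length : Int)) 0)) ∘ (fun k : Nat => (k : Int)))
            (zi * (ys.length * xs.length) + (yi * xs.length + xi)))
        = xs.map (fun x => (zs.getD zi 0, ys.getD yi 0, x)) := by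
      intro yi hyi
      rw [List.mem_range] at hyi
      have hmap : ∀ xi ∈ List.range xs.length,
          ((fun i =>
            (PySem.List.pyGetD zs (PySem.Int.floordiv (PySem.Int.floordiv i (xs.length : Int)) (ys.length : Int)) 0,
             PySem.List.pyGetD ys (PySem.Int.mod (PySem.Int.floordiv i (xs.length : Int)) (ys.length : Int)) 0,
             PySem.List.pyGetD xs (PySem.Int.mod i (xs.length : Int)) 0)) ∘ (fun k : Nat => (k : Int)))
            (zi * (ys.length * xs.length) + (yi * xs.length + xi))
          = (zs.getD zi 0, ys.getD yi 0, xs.getD xi 0) := by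
        intro xi hxi
        rw [List.mem_range] at hxi
        simp only [Function.comp_def, PySem.Int.floordiv_natCast, PySem.Int.mod_natCast,
            pv_decode_fst zi yi xi _ _ hyi hxi, pv_decode_snd zi yi xi _ _ hxi]
        have h1 : (zi * ys.length + yi) / ys.length = zi := by
          rw [Nat.mul_comm zi ys.length, Nat.mul_add_div (by omega : 0 < ys.length),
              Nat.div_eq_of_lt hyi, Nat.add_zero]
        have h2 : (zi * ys.length + yi) % ys.length = yi := by
          rw [Nat.mul_comm zi ys.length, Nat.mul_add_mod, Nat.mod_eq_of_lt hyi]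
        rw [h1, h2]
        simp [PySem.List.pyGetD_natCast]
      calc (List.range xs.length).map _
          = (List.range xs.length).map (fun xi => ((zs.getD zi 0, ys.getD yi 0, xs.getD xi 0) : Int × Int × Int)) :=
            List.map_congr_left hmap
        _ = xs.map (fun x => (zs.getD zi 0, ys.getD yi 0, x)) :=
            pv_map_range_getD xs (fun x => (zs.getD zi 0, ys.getD yi 0, x))
    calc (List.range ys.length).flatMap _
        = (List.range ys.length).flatMap (fun yi => xs.map (fun x => (zs.getD zi 0, ys.getD yi 0, x))) := by
          apply List.flatMap_congr
          intro yi hyi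
          exact inner yi hyi
      _ = ys.flatMap (fun y => xs.map (fun x => (zs.getD zi 0, y, x))) :=
          pv_flatMap_range_getD ys (fun y => xs.map (fun x => (zs.getD zi 0, y, x)))
  calc (List.range zs.length).flatMap _
      = (List.range zs.length).flatMap (fun zi => ys.flatMap (fun y => xs.map (fun x => (zs.getD zi 0, y, x)))) := by
        apply List.flatMap_congr
        intro zi hzi
        rw [List.mem_range] at hzi
        exact step zi hzi
    _ = zs.flatMap (fun z => ys.flatMap (fun y => xs.map (fun x => (z, y, x)))) :=
        pv_flatMap_range_getD zs (fun z => ys.flatMap (fun y => xs.map (fun x => (z, y, x))))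

-- ===== VERDICT (by name: the statement is the Claim_ definition above) =====
theorem patch_coords_py_spec : Claim_equal_patch_coords_py := by
  intro D H W ps st _ _
  show patch_coords_py D H W ps st = patch_coords_py_alt D H W ps st
  unfold patch_coords_py patch_coords_py_alt
  rw [pv_flat_product]
  simp only [PySem.List.foldl_append_singleton_eq_map, PySem.List.foldl_append_eq_flatMap,
    pvAxis, List.flatMap_map, List.map_map, List.nil_append, Function.comp_def]
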